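-- pv_equiv track=rewrite | github.com/DziarnowskiJ/AoC_2024 | day_5/part_2.py | fix_line
-- ===== SOURCE A (Python) =====
-- def fix_line(incorrect_line, part1):
--     # Create priority dict
--     priority_dict = {k: 0 for k in incorrect_line}
--     for rl in part1:
--         # If both parts of the rule are in the incorrect_line
--         # adjust their priority based on the rules
--         if all([r in priority_dict.keys() for r in rl]):
--             priority_dict[rl[0]] += 1
--             priority_dict[rl[1]] -= 1
--
--     def sort_key(num):
--         return priority_dict[num]
--
--     # Sort line based on priority_dict
--     return sorted(incorrect_line, key=sort_key)
-- ===== SOURCE B (Python) =====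
-- def fix_line(incorrect_line, part1):
--     # Different decomposition: no accumulator dict; filter applicable rules once,
--     # then sort with a key that scans the applicable rules per element.
--     members = set(incorrect_line)
--     applicable = [rl for rl in part1 if all(r in members for r in rl)]
--
--     def sort_key(x):
--         return sum((rl[0] == x) - (rl[1] == x) for rl in applicable)
--
--     return sorted(incorrect_line, key=sort_key)
-- ===== Notes on version B (the rewrite author's own statement) =====
-- stated objective: alternative
-- what changed: Replaces A's build-a-priority-dict-in-one-pass-then-sort with: filter the applicable rules once against a membership set, then sort with a key that scans the applicable rules per element (no accumulator table).
import Mathlib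
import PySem

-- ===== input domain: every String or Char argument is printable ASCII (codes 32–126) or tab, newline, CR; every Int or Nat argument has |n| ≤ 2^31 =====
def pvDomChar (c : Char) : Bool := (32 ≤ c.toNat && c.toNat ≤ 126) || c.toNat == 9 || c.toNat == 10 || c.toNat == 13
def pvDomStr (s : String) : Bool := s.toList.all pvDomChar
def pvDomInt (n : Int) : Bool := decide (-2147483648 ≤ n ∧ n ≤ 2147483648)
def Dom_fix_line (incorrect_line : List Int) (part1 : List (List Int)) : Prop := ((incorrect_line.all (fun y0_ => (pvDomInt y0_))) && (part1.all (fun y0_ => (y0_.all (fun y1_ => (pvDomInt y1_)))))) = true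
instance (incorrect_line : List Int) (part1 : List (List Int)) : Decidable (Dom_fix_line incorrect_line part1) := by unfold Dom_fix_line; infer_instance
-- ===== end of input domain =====

-- B drops A's accumulator dict: it filters the applicable rules once and sorts with a
-- per-element key that scans those rules (alternative decomposition, similar cost).


-- ===== PORT A =====
-- the body of the 'for rl in part1' loop of A
def fixA_step (d : PySem.Dict Int Int) (rl : List Int) : PySem.Dict Int Int :=
  if rl.all (fun r => d.contains r) then
    match PySem.List.pyGet? rl 0, PySem.List.pyGet? rl 1 with
    | some a, some b => (d.modify a 0 (· + 1)).modify b 0 (· - 1)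
    | _, _ => d        -- Python raises IndexError here; excluded by Pre_fix_line
  else d

def fix_line (incorrect_line : List Int) (part1 : List (List Int)) : List Int :=
  -- priority_dict = {k: 0 for k in incorrect_line}
  let d0 : PySem.Dict Int Int := incorrect_line.foldl (fun d k => d.insert k 0) PySem.Dict.empty
  let d := part1.foldl fixA_step d0
  PySem.List.sorted incorrect_line (fun n => d.getD n 0) false

-- ===== PORT B =====
-- sort_key of B: scan the applicable rules for element x
def fixB_key (applicable : List (List Int)) (x : Int) : Int :=
  (applicable.map (fun rl =>
    (if PySem.List.pyGet? rl 0 = some x then (1 : Int) else 0)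
      - (if PySem.List.pyGet? rl 1 = some x then (1 : Int) else 0))).sum

def fix_line_alt (incorrect_line : List Int) (part1 : List (List Int)) : List Int :=
  let members : PySem.Set Int := PySem.Set.ofList incorrect_line
  let applicable := part1.filter (fun rl => rl.all (fun r => PySem.Set.contains members r))
  PySem.List.sorted incorrect_line (fixB_key applicable) false

-- ===== PRECONDITION & SPEC =====
-- Pre_ excludes exactly the inputs on which A raises IndexError: a rule of length < 2 whose
-- elements all occur in the line (rl[0]/rl[1] out of range after the all(...) check passes).
def Pre_fix_line (incorrect_line : List Int) (part1 : List (List Int)) : Prop :=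
  ∀ rl ∈ part1, (∀ r ∈ rl, r ∈ incorrect_line) → 2 ≤ rl.length
instance (incorrect_line : List Int) (part1 : List (List Int)) : Decidable (Pre_fix_line incorrect_line part1) := by unfold Pre_fix_line; infer_instance

def pvWitness_fix_line : List Int × List (List Int) := ([3, 1, 2], [[2, 1], [3, 2]])

def Spec_fix_line (incorrect_line : List Int) (part1 : List (List Int)) (out : List Int) : Prop := out = fix_line_alt incorrect_line part1
instance (incorrect_line : List Int) (part1 : List (List Int)) (out : List Int) : Decidable (Spec_fix_line incorrect_line part1 out) := by unfold Spec_fix_line; infer_instance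

-- ===== CLAIM (what is proved, stated in full; the proofs are below) =====
def Claim_equal_fix_line : Prop := ∀ (incorrect_line : List Int) (part1 : List (List Int)), Dom_fix_line incorrect_line part1 → Pre_fix_line incorrect_line part1 → Spec_fix_line incorrect_line part1 (fix_line incorrect_line part1)

-- ===== LEMMAS AND PROOFS =====

-- the dict {k: 0 for k in line} maps everything to 0 under getD
lemma getD_init (l : List Int) (d : PySem.Dict Int Int) (x : Int)
    (h : d.getD x 0 = 0) : (l.foldl (fun d k => d.insert k 0) d).getD x 0 = 0 := by
  induction l generalizing d with
  | nil => exact h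
  | cons k t ih =>
      simp only [List.foldl_cons]
      exact ih _ (by rw [PySem.Dict.getD_insert]; split <;> [rfl; exact h])

-- keys of the initial dict are exactly the set of line elements
lemma keys_init (l : List Int) :
    (l.foldl (fun d k => d.insert k 0) (PySem.Dict.empty : PySem.Dict Int Int)).keys
      = PySem.Set.ofList l := by
  rw [PySem.Dict.keys_foldl_insert]
  simp [PySem.Dict.keys_empty, PySem.Set.update, PySem.Set.ofList_eq_foldl]

-- one loop step of A: effect on getD and on keys, under the invariant keys = set(line)
lemma fixA_loop (line : List Int) (x : Int) :
    ∀ (rules : List (List Int)) (d : PySem.Dict Int Int),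
      d.keys = PySem.Set.ofList line →
      (∀ rl ∈ rules, (∀ r ∈ rl, r ∈ line) → 2 ≤ rl.length) →
      (rules.foldl fixA_step d).getD x 0
        = d.getD x 0
          + fixB_key (rules.filter (fun rl => rl.all (fun r => PySem.Set.contains (PySem.Set.ofList line) r))) x := by
  intro rules
  induction rules with
  | nil => intro d hk hp; simp [fixB_key]
  | cons rl t ih =>
      intro d hk hp
      have hc : ∀ r : Int, d.contains r = PySem.Set.contains (PySem.Set.ofList line) r := by
        intro r
        rw [PySem.Dict.contains_eq_decide_mem_keys, hk]
        simp [PySem.Set.contains]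
      simp only [List.foldl_cons]
      by_cases hall : rl.all (fun r => PySem.Set.contains (PySem.Set.ofList line) r) = true
      · -- applicable rule
        have hmem : ∀ r ∈ rl, r ∈ line := by
          intro r hr
          have := List.all_eq_true.mp hall r hr
          simpa [PySem.Set.contains, PySem.Set.mem_ofList] using this
        have hlen : 2 ≤ rl.length := hp rl (by simp) hmem
        rcases rl with _ | ⟨r0, _ | ⟨r1, rest⟩⟩
        · simp at hlen
        · simp at hlen
        · have ha : PySem.List.pyGet? (r0 :: r1 :: rest) 0 = some r0 := by
            simp [PySem.List.pyGet?, PySem.List.pyIdx?]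
            rw [if_pos (by positivity)]
            simp
          have hb : PySem.List.pyGet? (r0 :: r1 :: rest) 1 = some r1 := by
            simp [PySem.List.pyGet?, PySem.List.pyIdx?]
          have hstep : fixA_step d (r0 :: r1 :: rest)
              = (d.modify r0 0 (· + 1)).modify r1 0 (· - 1) := by
            simp only [fixA_step, ha, hb]
            rw [if_pos]
            simp only [List.all_eq_true] at hall ⊢
            intro r hr; rw [hc r]; exact hall r hr
          have hain : r0 ∈ line := hmem r0 (by simp)
          have hbin : r1 ∈ line := hmem r1 (by simp)
          have hca : d.contains r0 = true := by
            rw [hc]; simp [PySem.Set.contains, PySem.Set.mem_ofList, hain]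
          have hdb : d.contains r1 = true := by
            rw [hc]; simp [PySem.Set.contains, PySem.Set.mem_ofList, hbin]
          have hcb : (d.modify r0 0 (· + 1)).contains r1 = true := by
            simp [PySem.Dict.contains_modify, hdb]
          have hkeys' : ((d.modify r0 0 (· + 1)).modify r1 0 (· - 1)).keys
              = PySem.Set.ofList line := by
            rw [PySem.Dict.keys_modify, PySem.Dict.keys_insert_of_contains _ _ hcb,
                PySem.Dict.keys_modify, PySem.Dict.keys_insert_of_contains _ _ hca, hk]
          rw [hstep, ih _ hkeys' (fun rl h => hp rl (by simp [h]))]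
          have hgd : ((d.modify r0 0 (· + 1)).modify r1 0 (· - 1)).getD x 0
              = d.getD x 0 + (if x = r0 then (1:Int) else 0) - (if x = r1 then (1:Int) else 0) := by
            simp only [PySem.Dict.getD_modify]
            split_ifs <;> simp_all
          rw [hgd, List.filter_cons, if_pos hall]
          simp only [fixB_key, List.map_cons, List.sum_cons, ha, hb]
          have e0 : (if some r0 = some x then (1:Int) else 0) = (if x = r0 then (1:Int) else 0) := by
            split_ifs with h1 h2 <;> simp_all
          have e1 : (if some r1 = some x then (1:Int) else 0) = (if x = r1 then (1:Int) else 0) := by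
            split_ifs with h1 h2 <;> simp_all
          rw [e0, e1]; ring
      · -- non-applicable rule: skipped
        have hstep : fixA_step d rl = d := by
          simp only [fixA_step]
          rw [if_neg]
          intro hcon
          exact hall (by
            simp only [List.all_eq_true] at hcon ⊢
            intro r hr; rw [← hc r]; exact hcon r hr)
        rw [hstep, ih _ hk (fun rl h => hp rl (by simp [h])), List.filter_cons, if_neg hall]

-- the two sort keys agree on every integer
lemma keys_agree (line : List Int) (part1 : List (List Int))
    (hp : ∀ rl ∈ part1, (∀ r ∈ rl, r ∈ line) → 2 ≤ rl.length) (x : Int) :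
    ((part1.foldl fixA_step
        (line.foldl (fun d k => d.insert k 0) PySem.Dict.empty)).getD x 0)
      = fixB_key (part1.filter (fun rl => rl.all (fun r => PySem.Set.contains (PySem.Set.ofList line) r))) x := by
  rw [fixA_loop line x part1 _ (keys_init line) hp, getD_init line _ x (by simp [PySem.Dict.getD_empty])]
  ring

-- ===== VERDICT (by name: the statement is the Claim_ definition above) =====
theorem fix_line_spec : Claim_equal_fix_line := by
  intro line part1 _ hpre
  unfold Spec_fix_line fix_line fix_line_alt
  exact congrArg (fun k => PySem.List.sorted line k false) (funext (keys_agree line part1 hpre))
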